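-- pv_equiv track=rewrite | github.com/JDSeiler/programming-problems | codeforces/round-560/d-almost-all-divisors.py | is_consistent
-- ===== SOURCE A (Python) =====
-- import math
--
-- def generate_factors(x):
--     factors = []
--     # based on
--     # https://stackoverflow.com/a/6800214
--
--     # x is at most 10^12, but the bound is sqrt(x) so it's ok
--     for i in range(2, math.floor(math.sqrt(x)) + 1):
--         if x % i == 0:
--             factors.append(i)
--             if x//i != i:
--                 factors.append(x//i)
--
--     return factors
--
-- def is_consistent(x, divisors):
--     # 1: The input could have a random incorrect value in it.
--     # It's cheaper to do a linear scan of the divisors first even though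
--     # checking all factors does the same thing.
--     for d in divisors:
--         if x % d != 0:
--             return False
--
--     all_factors = generate_factors(x)
--     # 2: The provided list of factors could be incomplete
--     # This is another O(F^2) operation, whatever
--     for f in all_factors:
--         if f not in divisors:
--             return False
--
--     return True
-- ===== SOURCE B (Python) =====
-- import math
--
-- def is_consistent(x, divisors):
--     if any(x % d != 0 for d in divisors):
--         return False
--     # prime-factorize x, then rebuild the full divisor set from the prime powers
--     n = x
--     primes = []
--     for i in range(2, math.floor(math.sqrt(x)) + 1):
--         if n % i == 0:
--             e = 0
--             while n % i == 0:
--                 n //= i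
--                 e += 1
--             primes.append((i, e))
--     if n > 1:
--         primes.append((n, 1))
--     divs = [1]
--     for (p, e) in primes:
--         divs = [d * p ** k for d in divs for k in range(e + 1)]
--     seen = set(divisors)
--     for d in divs:
--         if d != 1 and d != x and d not in seen:
--             return False
--     return True
-- ===== Notes on version B (the rewrite author's own statement) =====
-- stated objective: alternative
-- what changed: B keeps A's first divides-scan, but replaces A's trial-division enumeration of factor pairs with a prime factorization of x (dividing out each prime with its multiplicity), rebuilds the full divisor set as products of prime powers, and checks each nontrivial divisor against a set of the given list.
import Mathlib
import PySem

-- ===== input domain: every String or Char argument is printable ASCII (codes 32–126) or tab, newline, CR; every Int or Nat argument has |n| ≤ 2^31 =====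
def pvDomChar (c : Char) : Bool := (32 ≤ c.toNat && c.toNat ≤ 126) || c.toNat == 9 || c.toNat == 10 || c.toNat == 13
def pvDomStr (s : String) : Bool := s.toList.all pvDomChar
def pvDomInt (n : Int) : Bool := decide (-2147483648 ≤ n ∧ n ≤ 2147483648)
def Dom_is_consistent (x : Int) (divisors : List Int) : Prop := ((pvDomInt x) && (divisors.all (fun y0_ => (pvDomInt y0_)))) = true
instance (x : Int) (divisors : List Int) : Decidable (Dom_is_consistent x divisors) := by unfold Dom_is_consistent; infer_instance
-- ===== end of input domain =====

-- B keeps A's first divides-scan, then replaces A's factor-pair enumeration by a prime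
-- factorization of x whose prime powers are multiplied back out into the full divisor set,
-- each nontrivial divisor being checked against a set of the given list (objective: alternative).

-- ===== PORT A =====
-- math.floor(math.sqrt(x)) is ported as Nat.sqrt x.toNat: exact for 0 ≤ x ≤ 2^31 (the Dom bound);
-- for x < 0 Python raises ValueError there, which Pre_ excludes (the call is only reached when
-- every divisor divides x, and Pre_ then forces 0 ≤ x).
def generate_factors (x : Int) : List Int :=
  (PySem.List.pyRange 2 (((Nat.sqrt x.toNat : Nat) : Int) + 1) 1).foldl
    (fun factors i =>
      if PySem.Int.mod x i == 0 then
        (factors ++ [i]) ++ (if PySem.Int.floordiv x i != i then [PySem.Int.floordiv x i] else [])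
      else factors) []

def is_consistent_checkLoop (divisors : List Int) : List Int → Bool
  | [] => true
  | f :: fs => if !(divisors.contains f) then false else is_consistent_checkLoop divisors fs

def is_consistent_loop1 (x : Int) (divisors : List Int) : List Int → Bool
  | [] => is_consistent_checkLoop divisors (generate_factors x)
  | d :: ds => if PySem.Int.mod x d != 0 then false else is_consistent_loop1 x divisors ds

def is_consistent (x : Int) (divisors : List Int) : Bool :=
  is_consistent_loop1 x divisors divisors

-- ===== PORT B =====
-- 'while n % i == 0: n //= i; e += 1'. The guards 2 ≤ i and 1 ≤ n only make the recursion
-- total; Source B only enters this loop with i ≥ 2 and (inside Pre_) n ≥ 1, where they change nothing.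
def divideOut (i : Int) (n : Int) (e : Nat) : Int × Nat :=
  if h : 2 ≤ i ∧ 1 ≤ n ∧ PySem.Int.mod n i = 0 then
    divideOut i (PySem.Int.floordiv n i) (e + 1)
  else (n, e)
termination_by n.toNat
decreasing_by
  obtain ⟨hi, hn, -⟩ := h
  have hpos : (0:Int) < i := by omega
  rw [PySem.Int.floordiv_eq_ediv_of_pos hpos]
  have hdm := Int.mul_ediv_add_emod n i
  have hq0 : 0 ≤ n / i := Int.ediv_nonneg (by omega) (by omega)
  have hmod0 : 0 ≤ n % i := Int.emod_nonneg n (by omega)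
  have key : 2 * (n / i) + n % i ≤ n := by
    nlinarith [hdm, mul_nonneg (by omega : (0:Int) ≤ i - 2) hq0]
  generalize n / i = q at key hq0
  omega

-- one step of the 'for i in range(2, floor(sqrt(x)) + 1):' factorization loop of Source B
def bFactorStep (st : Int × List (Int × Nat)) (i : Int) : Int × List (Int × Nat) :=
  if PySem.Int.mod st.1 i = 0 then
    let r := divideOut i st.1 0
    (r.1, st.2 ++ [(i, r.2)])
  else st

def bFactor (x : Int) : Int × List (Int × Nat) :=
  (PySem.List.pyRange 2 (((Nat.sqrt x.toNat : Nat) : Int) + 1) 1).foldl bFactorStep (x, [])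

-- 'if n > 1: primes.append((n, 1))'
def bPrimes (x : Int) : List (Int × Nat) :=
  let r := bFactor x
  if r.1 > 1 then r.2 ++ [(r.1, 1)] else r.2

-- 'divs = [1]; for (p, e) in primes: divs = [d * p**k for d in divs for k in range(e+1)]'
def bDivs (primes : List (Int × Nat)) : List Int :=
  primes.foldl
    (fun divs pe => divs.flatMap (fun d => (List.range (pe.2 + 1)).map (fun k => d * pe.1 ^ k)))
    [1]

def is_consistent_alt (x : Int) (divisors : List Int) : Bool :=
  if divisors.any (fun d => PySem.Int.mod x d != 0) then false
  else
    (bDivs (bPrimes x)).all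
      (fun d => d == 1 || d == x || PySem.Set.contains (PySem.Set.ofList divisors) d)

-- ===== PRECONDITION & SPEC =====
-- Pre_ excludes exactly the inputs where A raises: a 0 in divisors reached before any non-divisor
-- (ZeroDivisionError in the first loop), and negative x when every divisor is a nonzero divisor of x
-- (math.sqrt then raises ValueError).
def Pre_is_consistent (x : Int) (divisors : List Int) : Prop :=
  (¬ ∃ i : Nat, i < divisors.length ∧ divisors.getD i 1 = 0 ∧
      ∀ j : Nat, j < i → (divisors.getD j 0 ≠ 0 ∧ PySem.Int.mod x (divisors.getD j 0) = 0)) ∧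
  ((∀ d ∈ divisors, d ≠ 0 ∧ PySem.Int.mod x d = 0) → 0 ≤ x)

instance (x : Int) (divisors : List Int) : Decidable (Pre_is_consistent x divisors) := by
  unfold Pre_is_consistent; infer_instance

def pvWitness_is_consistent : Int × List Int := (12, [2, 3, 4, 6])

def Spec_is_consistent (x : Int) (divisors : List Int) (out : Bool) : Prop := out = is_consistent_alt x divisors
instance (x : Int) (divisors : List Int) (out : Bool) : Decidable (Spec_is_consistent x divisors out) := by unfold Spec_is_consistent; infer_instance

-- ===== CLAIM (what is proved, stated in full; the proofs are below) =====
def Claim_equal_is_consistent : Prop := ∀ (x : Int) (divisors : List Int), Dom_is_consistent x divisors → Pre_is_consistent x divisors → Spec_is_consistent x divisors (is_consistent x divisors)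

-- ===== LEMMAS AND PROOFS =====

-- the condition both final checks are reduced to: every nontrivial divisor of x is in the list
def allNontriv (x : Int) (divisors : List Int) : Prop :=
  ∀ d : Int, d ∣ x → 1 < d → d < x → d ∈ divisors

-- the "factor i (and its cofactor) is accounted for" condition of A's second loop
def factOK (x : Int) (divisors : List Int) (i : Int) : Prop :=
  PySem.Int.mod x i = 0 →
    (i ∈ divisors ∧ (PySem.Int.floordiv x i = i ∨ PySem.Int.floordiv x i ∈ divisors))

def prodPE (l : List (Int × Nat)) : Int := (l.map (fun pe => pe.1 ^ pe.2)).prod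

theorem loop1_eq (x : Int) (divisors : List Int) (l : List Int) :
    is_consistent_loop1 x divisors l =
      if l.any (fun d => PySem.Int.mod x d != 0) then false
      else is_consistent_checkLoop divisors (generate_factors x) := by
  induction l with
  | nil => simp [is_consistent_loop1]
  | cons d ds ih =>
      simp only [is_consistent_loop1, List.any_cons, ih]
      by_cases h : PySem.Int.mod x d != 0 <;> simp [h]

theorem checkLoop_eq_all (divisors : List Int) (l : List Int) :
    is_consistent_checkLoop divisors l = l.all (fun f => divisors.contains f) := by
  induction l with
  | nil => rfl
  | cons f fs ih =>
      simp only [is_consistent_checkLoop, List.all_cons, ih]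
      cases h : divisors.contains f
      · simp
      · simp

theorem sqrt_bridge (x : Int) (hx : 0 ≤ x) (i : Int) (hi : 2 ≤ i) :
    i < ((Nat.sqrt x.toNat : Nat) : Int) + 1 ↔ i * i ≤ x := by
  have h0 : 0 ≤ i := by omega
  constructor
  · intro h
    have h1 : i.toNat ≤ Nat.sqrt x.toNat := by omega
    have h2 : i.toNat * i.toNat ≤ x.toNat := Nat.le_sqrt.mp h1
    have h3 : ((i.toNat * i.toNat : Nat) : Int) ≤ ((x.toNat : Nat) : Int) := by exact_mod_cast h2
    push_cast at h3
    rw [Int.toNat_of_nonneg h0, Int.toNat_of_nonneg hx] at h3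
    exact h3
  · intro h
    have h2 : i.toNat * i.toNat ≤ x.toNat := by
      have h3 : ((i.toNat * i.toNat : Nat) : Int) ≤ ((x.toNat : Nat) : Int) := by
        push_cast
        rw [Int.toNat_of_nonneg h0, Int.toNat_of_nonneg hx]
        exact h
      exact_mod_cast h3
    have := Nat.le_sqrt.mpr h2
    omega

theorem checkA_iff (x : Int) (divisors : List Int) (hx : 0 ≤ x) :
    is_consistent_checkLoop divisors (generate_factors x) = true ↔
      ∀ i : Int, 2 ≤ i → i * i ≤ x → factOK x divisors i := by
  rw [checkLoop_eq_all]
  have hfun : (fun (factors : List Int) (i : Int) =>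
      if PySem.Int.mod x i == 0 then
        (factors ++ [i]) ++ (if PySem.Int.floordiv x i != i then [PySem.Int.floordiv x i] else [])
      else factors)
    = fun factors i => factors ++ (if PySem.Int.mod x i == 0 then
        i :: (if PySem.Int.floordiv x i != i then [PySem.Int.floordiv x i] else []) else []) := by
    funext factors i; split_ifs <;> simp
  have hgen : generate_factors x =
      (PySem.List.pyRange 2 (((Nat.sqrt x.toNat : Nat) : Int) + 1) 1).flatMap
        (fun i => if PySem.Int.mod x i == 0 then
            i :: (if PySem.Int.floordiv x i != i then [PySem.Int.floordiv x i] else [])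
          else []) := by
    unfold generate_factors
    rw [hfun, PySem.List.foldl_append_eq_flatMap]
    simp
  rw [hgen, List.all_eq_true]
  simp only [List.mem_flatMap, PySem.List.mem_pyRange_one]
  constructor
  · intro h i hi hle hmod
    have hiB : i < ((Nat.sqrt x.toNat : Nat) : Int) + 1 := (sqrt_bridge x hx i hi).mpr hle
    have hci := h i ⟨i, ⟨hi, hiB⟩, by simp [hmod]⟩
    refine ⟨by simpa using hci, ?_⟩
    by_cases hq : PySem.Int.floordiv x i = i
    · exact Or.inl hq
    · have hcq := h (PySem.Int.floordiv x i) ⟨i, ⟨hi, hiB⟩, by simp [hmod, hq]⟩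
      exact Or.inr (by simpa using hcq)
  · rintro h f ⟨i, ⟨hi, hiB⟩, hf⟩
    have hle := (sqrt_bridge x hx i hi).mp hiB
    by_cases hmod : PySem.Int.mod x i = 0
    · obtain ⟨h1, h2⟩ := h i hi hle hmod
      simp only [hmod, beq_self_eq_true, if_true] at hf
      rcases List.mem_cons.mp hf with rfl | hf2
      · simpa using h1
      · by_cases hq : PySem.Int.floordiv x i = i
        · simp [hq] at hf2
        · simp only [bne_iff_ne, ne_eq, hq, not_false_eq_true, if_true, List.mem_singleton] at hf2
          subst hf2
          rcases h2 with h2 | h2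
          · exact absurd h2 hq
          · simpa using h2
    · simp [hmod] at hf

-- A's second loop succeeds iff every nontrivial divisor of x is in the list
theorem checkA_iff_allNontriv (x : Int) (divisors : List Int) (hx : 0 ≤ x) :
    is_consistent_checkLoop divisors (generate_factors x) = true ↔ allNontriv x divisors := by
  rw [checkA_iff x divisors hx]
  unfold allNontriv factOK
  constructor
  · intro H d hdvd hd1 hdx
    have hd2 : 2 ≤ d := by omega
    have hx2 : 2 ≤ x := by omega
    by_cases hsq : d * d ≤ x
    · exact ((H d hd2 hsq) ((PySem.Int.mod_eq_zero_iff_dvd x d).mpr hdvd)).1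
    · obtain ⟨c, hc⟩ := hdvd
      have hc1 : 1 ≤ c := by
        by_contra h
        rw [not_le] at h
        nlinarith [mul_nonneg (by omega : (0:Int) ≤ d) (by omega : (0:Int) ≤ -c)]
      have hcne : c ≠ 1 := by intro h; rw [h, mul_one] at hc; omega
      have hc2 : 2 ≤ c := by omega
      have hcd : c < d := by
        by_contra h
        rw [not_lt] at h
        exact hsq (by nlinarith [mul_le_mul_of_nonneg_left h (by omega : (0:Int) ≤ d)])
      have hcsq : c * c ≤ x := by nlinarith
      have hcdvd : c ∣ x := ⟨d, by rw [hc]; ring⟩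
      have H2 := H c hc2 hcsq ((PySem.Int.mod_eq_zero_iff_dvd x c).mpr hcdvd)
      have hfl : PySem.Int.floordiv x c = d := by
        rw [PySem.Int.floordiv_eq_ediv_of_pos (by omega), hc, mul_comm d c]
        exact Int.mul_ediv_cancel_left d (by omega)
      rcases H2.2 with he | he
      · rw [hfl] at he; omega
      · rwa [hfl] at he
  · intro H i h2 hsq hmod
    have hdvd : i ∣ x := (PySem.Int.mod_eq_zero_iff_dvd x i).mp hmod
    have h2i : 2 * i ≤ i * i := by nlinarith
    have hix : i < x := by omega
    refine ⟨H i hdvd (by omega) hix, ?_⟩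
    obtain ⟨q, hq⟩ := hdvd
    have hfl : PySem.Int.floordiv x i = q := by
      rw [PySem.Int.floordiv_eq_ediv_of_pos (by omega), hq]
      exact Int.mul_ediv_cancel_left q (by omega)
    by_cases heq : q = i
    · left; rw [hfl, heq]
    · right
      have hiq : i ≤ q := by nlinarith
      have hqx : q < x := by nlinarith
      rw [hfl]
      exact H q ⟨i, by rw [hq]; ring⟩ (by omega) hqx

-- divideOut i n e divides i out of n completely, counting the multiplicity on top of e
theorem divideOut_spec (i : Int) (hi : 2 ≤ i) : ∀ (n : Int) (e : Nat), 1 ≤ n →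
    1 ≤ (divideOut i n e).1 ∧ ¬ i ∣ (divideOut i n e).1 ∧
    n = (divideOut i n e).1 * i ^ ((divideOut i n e).2 - e) ∧ e ≤ (divideOut i n e).2 ∧
    (i ∣ n → e < (divideOut i n e).2) := by
  intro n e
  induction n, e using divideOut.induct i with
  | case1 n e h ih =>
      intro hn
      obtain ⟨-, -, hm⟩ := h
      have hdvd : i ∣ n := (PySem.Int.mod_eq_zero_iff_dvd n i).mp hm
      have hfl : PySem.Int.floordiv n i = n / i :=
        PySem.Int.floordiv_eq_ediv_of_pos (by omega)
      have hqmul : n / i * i = n := Int.ediv_mul_cancel hdvd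
      have hq1 : 1 ≤ n / i := by
        by_contra hcon
        rw [not_le] at hcon
        nlinarith [mul_nonneg (by omega : (0:Int) ≤ -(n / i)) (by omega : (0:Int) ≤ i)]
      rw [hfl] at ih
      have IH := ih hq1
      rw [divideOut, dif_pos ⟨hi, hn, hm⟩, hfl]
      generalize hR : divideOut i (n / i) (e + 1) = R at IH ⊢
      obtain ⟨ih1, ih2, ih3, ih4, -⟩ := IH
      refine ⟨ih1, ih2, ?_, by omega, fun _ => by omega⟩
      have hexp : R.2 - (e + 1) + 1 = R.2 - e := by omega
      calc n = n / i * i := hqmul.symm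
        _ = R.1 * i ^ (R.2 - (e + 1)) * i := by rw [ih3]
        _ = R.1 * i ^ (R.2 - (e + 1) + 1) := by rw [pow_succ, mul_assoc]
        _ = R.1 * i ^ (R.2 - e) := by rw [hexp]
  | case2 n e h =>
      intro hn
      rw [divideOut, dif_neg h]
      have hnm : PySem.Int.mod n i ≠ 0 := by
        intro hm; exact h ⟨hi, hn, hm⟩
      have hndvd : ¬ i ∣ n := fun hd => hnm ((PySem.Int.mod_eq_zero_iff_dvd n i).mpr hd)
      exact ⟨hn, hndvd, by simp, le_rfl, fun hd => absurd hd hndvd⟩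

-- a number ≥ 2 with no divisor strictly between 1 and itself is prime
theorem prime_of_no_small_dvd (p : Int) (hp : 2 ≤ p)
    (h : ∀ j : Int, 2 ≤ j → j < p → ¬ j ∣ p) : Prime p := by
  rw [Int.prime_iff_natAbs_prime, Nat.prime_def_lt]
  refine ⟨by omega, ?_⟩
  intro m hm hdvd
  by_contra h1
  have hm0 : m ≠ 0 := by
    intro h0
    rw [h0] at hdvd
    have := Nat.eq_zero_of_zero_dvd hdvd
    omega
  have hm2 : 2 ≤ m := by omega
  have hdvd' : (m : Int) ∣ p := by
    have h2 : (m : Int) ∣ (p.natAbs : Int) := Int.natCast_dvd_natCast.mpr hdvd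
    rwa [Int.natAbs_of_nonneg (by omega)] at h2
  exact h (m : Int) (by omega) (by omega) hdvd'

-- invariant of Source B's factorization loop
theorem factorLoop (b : Int) (k : Nat) : ∀ (a n : Int) (ps : List (Int × Nat)),
    (b - a).toNat ≤ k → 2 ≤ a → 1 ≤ n →
    (∀ j : Int, 2 ≤ j → j < a → ¬ j ∣ n) →
    1 ≤ ((PySem.List.pyRange a b 1).foldl bFactorStep (n, ps)).1 ∧
    ((PySem.List.pyRange a b 1).foldl bFactorStep (n, ps)).1 ∣ n ∧
    (∀ j : Int, 2 ≤ j → j < b → ¬ j ∣ ((PySem.List.pyRange a b 1).foldl bFactorStep (n, ps)).1) ∧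
    (∃ new, ((PySem.List.pyRange a b 1).foldl bFactorStep (n, ps)).2 = ps ++ new ∧
      n = ((PySem.List.pyRange a b 1).foldl bFactorStep (n, ps)).1 * prodPE new ∧
      ∀ pe ∈ new, Prime pe.1 ∧ 2 ≤ pe.1) := by
  induction k with
  | zero =>
      intro a n ps hk ha hn hnf
      have hba : b ≤ a := by omega
      rw [PySem.List.pyRange_one_eq_nil hba]
      exact ⟨hn, dvd_refl n, fun j hj hjb => hnf j hj (by omega), [], by simp,
        by simp [prodPE], by simp⟩
  | succ k ih =>
      intro a n ps hk ha hn hnf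
      by_cases hab : a < b
      · rw [PySem.List.pyRange_one_cons hab, List.foldl_cons]
        by_cases hm : PySem.Int.mod n a = 0
        · have hadvd : a ∣ n := (PySem.Int.mod_eq_zero_iff_dvd n a).mp hm
          have hspec := divideOut_spec a ha n 0 hn
          rcases hE : divideOut a n 0 with ⟨r1, r2⟩
          rw [hE] at hspec
          dsimp only at hspec
          rw [Nat.sub_zero] at hspec
          obtain ⟨hr1, hrnd, hrprod, -, -⟩ := hspec
          have hstep : bFactorStep (n, ps) a = (r1, ps ++ [(a, r2)]) := by
            simp [bFactorStep, hm, hE]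
          rw [hstep]
          have hrdvd : r1 ∣ n := ⟨a ^ r2, hrprod⟩
          have hprime : Prime a := by
            apply prime_of_no_small_dvd a ha
            intro j hj2 hja hjd
            exact hnf j hj2 hja (hjd.trans hadvd)
          have hnf' : ∀ j : Int, 2 ≤ j → j < a + 1 → ¬ j ∣ r1 := by
            intro j hj2 hja hjd
            by_cases hje : j = a
            · rw [hje] at hjd; exact hrnd hjd
            · exact hnf j hj2 (by omega) (hjd.trans hrdvd)
          obtain ⟨ih1, ih2, ih3, new', hps', hprod', hprime'⟩ :=
            ih (a + 1) r1 (ps ++ [(a, r2)]) (by omega) (by omega) hr1 hnf'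
          refine ⟨ih1, ih2.trans hrdvd, ih3, (a, r2) :: new', ?_, ?_, ?_⟩
          · rw [hps', List.append_assoc]; rfl
          · have hpc : prodPE ((a, r2) :: new') = a ^ r2 * prodPE new' := by
              simp [prodPE]
            rw [hpc]
            conv_lhs => rw [hrprod, hprod']
            ring
          · intro pe hpe
            rcases List.mem_cons.mp hpe with rfl | hpe'
            · exact ⟨hprime, ha⟩
            · exact hprime' pe hpe'
        · have hstep : bFactorStep (n, ps) a = (n, ps) := by simp [bFactorStep, hm]
          rw [hstep]
          have hnf' : ∀ j : Int, 2 ≤ j → j < a + 1 → ¬ j ∣ n := by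
            intro j hj2 hja hjd
            by_cases hje : j = a
            · rw [hje] at hjd
              exact hm ((PySem.Int.mod_eq_zero_iff_dvd n a).mpr hjd)
            · exact hnf j hj2 (by omega) hjd
          exact ih (a + 1) n ps (by omega) (by omega) hn hnf'
      · rw [PySem.List.pyRange_one_eq_nil (by omega)]
        exact ⟨hn, dvd_refl n, fun j hj hjb => hnf j hj (by omega), [], by simp,
          by simp [prodPE], by simp⟩

-- for 1 ≤ x, bPrimes x is a prime factorization of x
theorem bPrimes_spec (x : Int) (hx : 1 ≤ x) :
    x = prodPE (bPrimes x) ∧ ∀ pe ∈ bPrimes x, Prime pe.1 ∧ 2 ≤ pe.1 := by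
  obtain ⟨h1, hdvd, hnf, new, hps, hprod, hprime⟩ :=
    factorLoop (((Nat.sqrt x.toNat : Nat) : Int) + 1)
      ((((Nat.sqrt x.toNat : Nat) : Int) + 1) - 2).toNat 2 x [] (by omega) (by omega) hx
      (fun j hj1 hj2 => (by omega : False).elim)
  rw [List.nil_append] at hps
  have hBF : bFactor x =
      (PySem.List.pyRange 2 (((Nat.sqrt x.toNat : Nat) : Int) + 1) 1).foldl bFactorStep (x, []) := rfl
  rw [← hBF] at h1 hdvd hnf hps hprod
  have hBP : bPrimes x =
      if (bFactor x).1 > 1 then (bFactor x).2 ++ [((bFactor x).1, 1)] else (bFactor x).2 := rfl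
  have hr_le_x : (bFactor x).1 ≤ x := Int.le_of_dvd (by omega) hdvd
  have hsx : x < (((Nat.sqrt x.toNat : Nat) : Int) + 1) * (((Nat.sqrt x.toNat : Nat) : Int) + 1) := by
    have h := Nat.lt_succ_sqrt x.toNat
    have hc : ((x.toNat : Nat) : Int) <
        (((Nat.sqrt x.toNat + 1) * (Nat.sqrt x.toNat + 1) : Nat) : Int) := by exact_mod_cast h
    rw [Int.toNat_of_nonneg (by omega : (0:Int) ≤ x)] at hc
    push_cast at hc
    linarith
  by_cases hgt : (bFactor x).1 > 1
  · rw [hBP, if_pos hgt, hps]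
    have hprime_r : Prime (bFactor x).1 := by
      apply prime_of_no_small_dvd _ (by omega)
      intro j hj2 hjr hjd
      rcases lt_or_ge j (((Nat.sqrt x.toNat : Nat) : Int) + 1) with hlt | hge
      · exact hnf j hj2 hlt hjd
      · obtain ⟨c, hc⟩ := hjd
        have hc1 : 1 ≤ c := by
          by_contra hcon
          rw [not_le] at hcon
          nlinarith [mul_nonneg (by omega : (0:Int) ≤ j) (by omega : (0:Int) ≤ -c)]
        have hcne : c ≠ 1 := by intro he; rw [he, mul_one] at hc; omega
        have hcdvd : c ∣ (bFactor x).1 := ⟨j, by rw [hc]; ring⟩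
        rcases lt_or_ge c (((Nat.sqrt x.toNat : Nat) : Int) + 1) with hlt2 | hge2
        · exact hnf c (by omega) hlt2 hcdvd
        · have hbig : (((Nat.sqrt x.toNat : Nat) : Int) + 1) * (((Nat.sqrt x.toNat : Nat) : Int) + 1) ≤
              j * c := mul_le_mul hge hge2 (by omega) (by omega)
          have hjc : j * c ≤ x := hc ▸ hr_le_x
          linarith
    refine ⟨?_, ?_⟩
    · have hpapp : prodPE (new ++ [((bFactor x).1, 1)]) = prodPE new * (bFactor x).1 := by
        simp [prodPE]
      rw [hpapp]
      conv_lhs => rw [hprod]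
      ring
    · intro pe hpe
      rcases List.mem_append.mp hpe with h | h
      · exact hprime pe h
      · rw [List.mem_singleton.mp h]
        exact ⟨hprime_r, by omega⟩
  · rw [hBP, if_neg hgt, hps]
    refine ⟨?_, hprime⟩
    have hr1 : (bFactor x).1 = 1 := by omega
    rw [hprod, hr1, one_mul]

-- the divisor-combining step of Source B's last comprehension
def bStep (A : List Int) (pe : Int × Nat) : List Int :=
  A.flatMap (fun d => (List.range (pe.2 + 1)).map (fun k => d * pe.1 ^ k))

theorem mem_bStep (A : List Int) (pe : Int × Nat) (y : Int) :
    y ∈ bStep A pe ↔ ∃ a ∈ A, ∃ k, k ≤ pe.2 ∧ y = a * pe.1 ^ k := by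
  simp only [bStep, List.mem_flatMap, List.mem_map, List.mem_range]
  constructor
  · rintro ⟨a, ha, k, hk, hky⟩
    exact ⟨a, ha, k, by omega, hky.symm⟩
  · rintro ⟨a, ha, k, hk, hky⟩
    exact ⟨a, ha, k, by omega, hky.symm⟩

theorem mem_foldl_step (l : List (Int × Nat)) : ∀ (A : List Int) (d : Int),
    d ∈ l.foldl bStep A ↔ ∃ a ∈ A, ∃ c ∈ l.foldl bStep [1], d = a * c := by
  induction l with
  | nil =>
      intro A d
      simp only [List.foldl_nil, List.mem_singleton]
      constructor
      · intro h; exact ⟨d, h, 1, rfl, (mul_one d).symm⟩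
      · rintro ⟨a, ha, c, rfl, rfl⟩; simpa using ha
  | cons pe l ih =>
      intro A d
      constructor
      · intro h
        rw [List.foldl_cons, ih (bStep A pe) d] at h
        obtain ⟨a', ha', c, hc, rfl⟩ := h
        obtain ⟨a, ha, k, hk, rfl⟩ := (mem_bStep A pe a').mp ha'
        refine ⟨a, ha, pe.1 ^ k * c, ?_, by ring⟩
        rw [List.foldl_cons, ih (bStep [1] pe) (pe.1 ^ k * c)]
        exact ⟨pe.1 ^ k,
          (mem_bStep [1] pe _).mpr ⟨1, List.mem_singleton.mpr rfl, k, hk, (one_mul _).symm⟩,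
          c, hc, rfl⟩
      · rintro ⟨a, ha, c', hc', rfl⟩
        rw [List.foldl_cons, ih (bStep [1] pe) c'] at hc'
        obtain ⟨b, hb, c, hc, rfl⟩ := hc'
        obtain ⟨o, ho, k, hk, rfl⟩ := (mem_bStep [1] pe b).mp hb
        rw [List.mem_singleton] at ho
        subst ho
        rw [List.foldl_cons, ih (bStep A pe) _]
        exact ⟨a * pe.1 ^ k, (mem_bStep A pe _).mpr ⟨a, ha, k, hk, rfl⟩, c, hc, by ring⟩

theorem mem_foldl_one : ∀ (l : List (Int × Nat)), (∀ pe ∈ l, Prime pe.1 ∧ 2 ≤ pe.1) →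
    ∀ d : Int, (d ∈ l.foldl bStep [1] ↔ 0 < d ∧ d ∣ prodPE l) := by
  intro l
  induction l with
  | nil =>
      intro _ d
      simp only [List.foldl_nil, List.mem_singleton, prodPE, List.map_nil, List.prod_nil]
      constructor
      · rintro rfl; exact ⟨one_pos, dvd_refl 1⟩
      · rintro ⟨hd0, hd1⟩
        rcases Int.isUnit_iff.mp (isUnit_of_dvd_one hd1) with h | h
        · exact h
        · omega
  | cons pe l ih =>
      intro hl d
      have hp := hl pe List.mem_cons_self
      have ihl := ih (fun q hq => hl q (List.mem_cons_of_mem _ hq))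
      have hpc : prodPE (pe :: l) = pe.1 ^ pe.2 * prodPE l := by simp [prodPE]
      rw [List.foldl_cons, mem_foldl_step l (bStep [1] pe) d, hpc]
      constructor
      · rintro ⟨b, hb, c, hc, rfl⟩
        obtain ⟨o, ho, k, hk, rfl⟩ := (mem_bStep [1] pe b).mp hb
        rw [List.mem_singleton] at ho
        subst ho
        obtain ⟨hc0, hcd⟩ := (ihl c).mp hc
        have hkpos : (0:Int) < pe.1 ^ k := pow_pos (by omega) k
        constructor
        · simpa using mul_pos hkpos hc0
        · have hdv := mul_dvd_mul (pow_dvd_pow pe.1 hk) hcd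
          simpa using hdv
      · rintro ⟨hd0, hdd⟩
        obtain ⟨u, v, hu, hv, rfl⟩ := exists_dvd_and_dvd_of_dvd_mul hdd
        have hune : u ≠ 0 := by rintro rfl; simp at hd0
        have hvne : v ≠ 0 := by rintro rfl; simp at hd0
        have huabs : |u| ∣ pe.1 ^ pe.2 := (abs_dvd u _).mpr hu
        have hvabs : |v| ∣ prodPE l := (abs_dvd v _).mpr hv
        obtain ⟨k, hk, hassoc⟩ := (dvd_prime_pow hp.1 _).mp huabs
        have hkpos : (0:Int) < pe.1 ^ k := pow_pos (by omega) k
        have hupos : 0 < |u| := abs_pos.mpr hune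
        have hueq : |u| = pe.1 ^ k := by
          rcases Int.associated_iff.mp hassoc with h | h
          · exact h
          · omega
        have hdeq : u * v = |u| * |v| := by
          rw [← abs_mul]; exact (abs_of_pos hd0).symm
        refine ⟨pe.1 ^ k,
          (mem_bStep [1] pe _).mpr ⟨1, List.mem_singleton.mpr rfl, k, hk, (one_mul _).symm⟩,
          |v|, (ihl |v|).mpr ⟨abs_pos.mpr hvne, hvabs⟩, ?_⟩
        rw [hdeq, hueq]

-- membership in the generated divisor list = positive divisor of the factored number
theorem mem_bDivs (l : List (Int × Nat)) (hl : ∀ pe ∈ l, Prime pe.1 ∧ 2 ≤ pe.1) (d : Int) :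
    d ∈ bDivs l ↔ 0 < d ∧ d ∣ prodPE l := by
  have : bDivs l = l.foldl bStep [1] := rfl
  rw [this]
  exact mem_foldl_one l hl d

-- B's final check succeeds iff every nontrivial divisor of x is in the list
theorem checkB_iff_allNontriv (x : Int) (divisors : List Int) (hx : 0 ≤ x) :
    ((bDivs (bPrimes x)).all
        (fun d => d == 1 || d == x || PySem.Set.contains (PySem.Set.ofList divisors) d) = true) ↔
      allNontriv x divisors := by
  have hset : ∀ y : Int, (PySem.Set.contains (PySem.Set.ofList divisors) y = true) ↔ y ∈ divisors := by
    intro y; simp [PySem.Set.mem_ofList]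
  rcases eq_or_lt_of_le hx with hx0 | hx1
  · rw [← hx0]
    have hb : bDivs (bPrimes 0) = [1] := by decide
    rw [hb]
    constructor
    · intro _ d _ h1 h2
      exact absurd (h1.trans h2) (by omega)
    · intro _
      simp
  · obtain ⟨hprod, hprime⟩ := bPrimes_spec x hx1
    rw [List.all_eq_true]
    constructor
    · intro H d hdvd hd1 hdx
      have hmem : d ∈ bDivs (bPrimes x) :=
        (mem_bDivs _ hprime d).mpr ⟨by omega, by rw [← hprod]; exact hdvd⟩
      have hH := H d hmem
      simp only [Bool.or_eq_true, beq_iff_eq] at hH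
      rcases hH with (h | h) | h
      · omega
      · omega
      · exact (hset d).mp h
    · intro H d hmem
      obtain ⟨hd0, hdd'⟩ := (mem_bDivs _ hprime d).mp hmem
      have hdd : d ∣ x := by rw [hprod]; exact hdd'
      simp only [Bool.or_eq_true, beq_iff_eq]
      by_cases h1 : d = 1
      · exact Or.inl (Or.inl h1)
      · by_cases hX : d = x
        · exact Or.inl (Or.inr hX)
        · exact Or.inr ((hset d).mpr
            (H d hdd (by omega) (lt_of_le_of_ne (Int.le_of_dvd (by omega) hdd) hX)))

theorem exists_first_zero (x : Int) : ∀ (ds : List Int),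
    (∀ d ∈ ds, PySem.Int.mod x d = 0) → (0:Int) ∈ ds →
    ∃ i : Nat, i < ds.length ∧ ds.getD i 1 = 0 ∧
      ∀ j : Nat, j < i → (ds.getD j 0 ≠ 0 ∧ PySem.Int.mod x (ds.getD j 0) = 0)
  | [] => by simp
  | d :: ds => by
    intro hall hmem
    by_cases hd : d = 0
    · exact ⟨0, by simp, by simp [hd], by omega⟩
    · have hm : (0:Int) ∈ ds := by
        rcases List.mem_cons.mp hmem with h | h
        · exact absurd h.symm hd
        · exact h
      obtain ⟨i, hi, hz, hj⟩ :=
        exists_first_zero x ds (fun e he => hall e (List.mem_cons_of_mem _ he)) hm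
      refine ⟨i + 1, by simpa using hi, by simpa using hz, ?_⟩
      intro j hj'
      cases j with
      | zero =>
          refine ⟨by simpa using hd, ?_⟩
          simpa using hall d List.mem_cons_self
      | succ j =>
          simpa using hj j (by omega)

theorem main_eq (x : Int) (divisors : List Int)
    (hpre : Pre_is_consistent x divisors) :
    is_consistent x divisors = is_consistent_alt x divisors := by
  unfold is_consistent is_consistent_alt
  rw [loop1_eq]
  by_cases hany : divisors.any (fun d => PySem.Int.mod x d != 0) = true
  · simp [hany]
  · rw [Bool.not_eq_true] at hany
    simp only [hany, Bool.false_eq_true, if_false]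
    have hall : ∀ d ∈ divisors, PySem.Int.mod x d = 0 := by
      intro d hd
      have := List.any_eq_false.mp hany d hd
      simpa using this
    have hz : (0:Int) ∉ divisors := fun h0 => hpre.1 (exists_first_zero x divisors hall h0)
    have hx : 0 ≤ x := hpre.2 (fun d hd => ⟨fun he => hz (he ▸ hd), hall d hd⟩)
    rw [Bool.eq_iff_iff, checkA_iff_allNontriv x divisors hx, checkB_iff_allNontriv x divisors hx]

-- ===== VERDICT (by name: the statement is the Claim_ definition above) =====
theorem is_consistent_spec : Claim_equal_is_consistent := by
  intro x divisors _hdom hpre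
  unfold Spec_is_consistent
  exact main_eq x divisors hpre
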